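-- pv_equiv track=rewrite | github.com/dydx-prime/MagViewerGUI | surface.py | generate_snail_positions
-- ===== SOURCE A (Python) =====
-- def generate_snail_positions(rows, cols):
--     positions = []
--     left, right = 0, cols - 1
--     top, bottom = 0, rows - 1
--
--     while left <= right and top <= bottom:
--
--         for r in range(bottom, top - 1, -1):
--             positions.append((r, left))
--         left += 1
--
--         for c in range(left, right + 1):
--             positions.append((top, c))
--         top += 1
--
--         if left <= right:
--             for r in range(top, bottom + 1):
--                 positions.append((r, right))
--             right -= 1
--
--         if top <= bottom:
--             for c in range(right, left - 1, -1):
--                 positions.append((bottom, c))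
--             bottom -= 1
--
--     return positions
-- ===== SOURCE B (Python) =====
-- def generate_snail_positions(rows, cols):
--     if rows <= 0 or cols <= 0:
--         return []
--     DIRS = [(-1, 0), (0, 1), (1, 0), (0, -1)]  # up, right, down, left
--     positions = []
--     visited = set()
--     r, c, d = rows - 1, 0, 0
--     for _ in range(rows * cols):
--         positions.append((r, c))
--         visited.add((r, c))
--         dr, dc = DIRS[d]
--         nr, nc = r + dr, c + dc
--         if not (0 <= nr < rows and 0 <= nc < cols) or (nr, nc) in visited:
--             d = (d + 1) % 4
--             dr, dc = DIRS[d]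
--             nr, nc = r + dr, c + dc
--         r, c = nr, nc
--     return positions
-- ===== Notes on version B (the rewrite author's own statement) =====
-- stated objective: alternative
-- what changed: A builds the spiral layer by layer with four range-loops over shrinking left/right/top/bottom bounds; B is a single direction-stepping walk that starts at the bottom-left corner heading up, keeps a visited set, and turns right (up->right->down->left cycle) whenever the next cell is off-grid or already visited.
import Mathlib
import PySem

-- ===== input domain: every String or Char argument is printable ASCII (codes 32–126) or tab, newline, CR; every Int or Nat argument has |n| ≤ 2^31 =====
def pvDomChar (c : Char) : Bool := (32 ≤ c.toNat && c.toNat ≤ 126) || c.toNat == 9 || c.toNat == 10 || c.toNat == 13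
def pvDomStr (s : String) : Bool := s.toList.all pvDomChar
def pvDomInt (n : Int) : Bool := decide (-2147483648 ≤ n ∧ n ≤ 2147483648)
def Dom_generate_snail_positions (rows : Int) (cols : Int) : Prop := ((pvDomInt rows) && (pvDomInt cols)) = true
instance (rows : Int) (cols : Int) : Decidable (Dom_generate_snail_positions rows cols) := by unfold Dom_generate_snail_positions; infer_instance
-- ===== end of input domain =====

-- B replaces A's four-loops-per-shrinking-layer construction by a single direction-stepping
-- walk with a visited set (alternative algorithm, same O(rows*cols) cost).

-- ===== PORT A =====
-- while left <= right and top <= bottom: emit left column (bottom..top), top row, right column, bottom row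
-- (fuel is only a totality guard: each iteration shrinks (right-left)+(bottom-top)+2 by at least 2,
-- so the fuel passed below is never exhausted)
def snailA_loop : Nat → Int → Int → Int → Int → List (Int × Int) → List (Int × Int)
  | 0, _, _, _, _, positions => positions
  | fuel + 1, left, right, top, bottom, positions =>
  if left ≤ right ∧ top ≤ bottom then
    let positions1 := positions ++ (PySem.List.pyRange bottom (top - 1) (-1)).map (fun r => (r, left))
    let left1 := left + 1
    let positions2 := positions1 ++ (PySem.List.pyRange left1 (right + 1) 1).map (fun c => (top, c))
    let top1 := top + 1
    let positions3 := if left1 ≤ right then positions2 ++ (PySem.List.pyRange top1 (bottom + 1) 1).map (fun r => (r, right)) else positions2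
    let right1 := if left1 ≤ right then right - 1 else right
    let positions4 := if top1 ≤ bottom then positions3 ++ (PySem.List.pyRange right1 (left1 - 1) (-1)).map (fun c => (bottom, c)) else positions3
    let bottom1 := if top1 ≤ bottom then bottom - 1 else bottom
    snailA_loop fuel left1 right1 top1 bottom1 positions4
  else positions

def generate_snail_positions (rows : Int) (cols : Int) : List (Int × Int) :=
  snailA_loop (cols + rows).toNat 0 (cols - 1) 0 (rows - 1) []

-- ===== PORT B =====
structure SnailSt where
  positions : List (Int × Int)
  visited : PySem.Set (Int × Int)
  r : Int
  c : Int
  d : Int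
deriving Repr, DecidableEq

-- DIRS = [(-1,0),(0,1),(1,0),(0,-1)]  (up, right, down, left)
def pvDirs : List (Int × Int) := [(-1, 0), (0, 1), (1, 0), (0, -1)]

-- one iteration of B's for-loop body (d is always in 0..3, so DIRS[d] never raises)
def snailB_step (rows cols : Int) (s : SnailSt) : SnailSt :=
  let positions := s.positions ++ [(s.r, s.c)]
  let visited := PySem.Set.add s.visited (s.r, s.c)
  let dir := PySem.List.pyGetD pvDirs s.d (0, 0)
  let nr := s.r + dir.1
  let nc := s.c + dir.2
  if ¬(0 ≤ nr ∧ nr < rows ∧ 0 ≤ nc ∧ nc < cols) ∨ (nr, nc) ∈ visited then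
    let d1 := PySem.Int.mod (s.d + 1) 4
    let dir1 := PySem.List.pyGetD pvDirs d1 (0, 0)
    ⟨positions, visited, s.r + dir1.1, s.c + dir1.2, d1⟩
  else
    ⟨positions, visited, nr, nc, s.d⟩

def generate_snail_positions_alt (rows : Int) (cols : Int) : List (Int × Int) :=
  if rows ≤ 0 ∨ cols ≤ 0 then []
  else ((PySem.List.pyRange 0 (rows * cols) 1).foldl (fun s _ => snailB_step rows cols s)
        ⟨[], PySem.Set.empty, rows - 1, 0, 0⟩).positions

-- ===== PRECONDITION & SPEC =====
def Spec_generate_snail_positions (rows : Int) (cols : Int) (out : List (Int × Int)) : Prop := out = generate_snail_positions_alt rows cols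
instance (rows : Int) (cols : Int) (out : List (Int × Int)) : Decidable (Spec_generate_snail_positions rows cols out) := by unfold Spec_generate_snail_positions; infer_instance

-- ===== CLAIM (what is proved, stated in full; the proofs are below) =====
def Claim_equal_generate_snail_positions : Prop := ∀ (rows : Int) (cols : Int), Dom_generate_snail_positions rows cols → Spec_generate_snail_positions rows cols (generate_snail_positions rows cols)

-- ===== LEMMAS AND PROOFS =====

-- iterate B's step n times (front-first), for reasoning about the foldl over range(rows*cols)
def pvIter (rows cols : Int) : Nat → SnailSt → SnailSt
  | 0, s => s
  | n + 1, s => pvIter rows cols n (snailB_step rows cols s)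

theorem pvIter_add (rows cols : Int) (m n : Nat) (s : SnailSt) :
    pvIter rows cols (m + n) s = pvIter rows cols n (pvIter rows cols m s) := by
  induction m generalizing s with
  | zero => simp [pvIter]
  | succ m ih =>
      have h : m + 1 + n = (m + n) + 1 := by omega
      rw [h]
      simpa [pvIter] using ih (snailB_step rows cols s)

theorem foldl_eq_pvIter (rows cols : Int) (l : List Int) (s : SnailSt) :
    l.foldl (fun s _ => snailB_step rows cols s) s = pvIter rows cols l.length s := by
  induction l generalizing s with
  | nil => rfl
  | cons x xs ih => simpa [pvIter] using ih (snailB_step rows cols s)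

-- free = inside the grid and not yet visited
def pvFree (rows cols : Int) (V : PySem.Set (Int × Int)) (p : Int × Int) : Prop :=
  (0 ≤ p.1 ∧ p.1 < rows ∧ 0 ≤ p.2 ∧ p.2 < cols) ∧ p ∉ V

def pvInRect (l r t b : Int) (p : Int × Int) : Prop :=
  t ≤ p.1 ∧ p.1 ≤ b ∧ l ≤ p.2 ∧ p.2 ≤ r

theorem pvFree_add (rows cols : Int) (V : PySem.Set (Int × Int)) (q p : Int × Int) :
    pvFree rows cols (PySem.Set.add V q) p ↔ pvFree rows cols V p ∧ p ≠ q := by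
  simp only [pvFree, PySem.Set.mem_add]
  tauto

theorem snailA_stop (fuel : Nat) (l r t b : Int) (acc : List (Int × Int)) (h : ¬(l ≤ r ∧ t ≤ b)) :
    snailA_loop fuel l r t b acc = acc := by
  cases fuel with
  | zero => rfl
  | succ f => simp only [snailA_loop]; rw [if_neg h]

theorem step_go (rows cols : Int) (acc : List (Int × Int)) (V : PySem.Set (Int × Int))
    (r c d dr dc : Int)
    (hdir : PySem.List.pyGetD pvDirs d (0, 0) = (dr, dc))
    (hfree : pvFree rows cols (PySem.Set.add V (r, c)) (r + dr, c + dc)) :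
    snailB_step rows cols ⟨acc, V, r, c, d⟩ =
      ⟨acc ++ [(r, c)], PySem.Set.add V (r, c), r + dr, c + dc, d⟩ := by
  have hc : ¬(¬(0 ≤ r + dr ∧ r + dr < rows ∧ 0 ≤ c + dc ∧ c + dc < cols) ∨
      (r + dr, c + dc) ∈ PySem.Set.add V (r, c)) := by
    simp only [pvFree] at hfree
    rw [not_or, not_not]
    exact ⟨hfree.1, hfree.2⟩
  simp only [snailB_step, hdir]
  rw [if_neg hc]

theorem step_turn (rows cols : Int) (acc : List (Int × Int)) (V : PySem.Set (Int × Int))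
    (r c d dr dc : Int)
    (hdir : PySem.List.pyGetD pvDirs (PySem.Int.mod (d + 1) 4) (0, 0) = (dr, dc))
    (hblocked : ¬ pvFree rows cols (PySem.Set.add V (r, c))
        (r + (PySem.List.pyGetD pvDirs d (0, 0)).1, c + (PySem.List.pyGetD pvDirs d (0, 0)).2)) :
    snailB_step rows cols ⟨acc, V, r, c, d⟩ =
      ⟨acc ++ [(r, c)], PySem.Set.add V (r, c), r + dr, c + dc, PySem.Int.mod (d + 1) 4⟩ := by
  set q := PySem.List.pyGetD pvDirs d (0, 0) with hq
  have hc : (¬(0 ≤ r + q.1 ∧ r + q.1 < rows ∧ 0 ≤ c + q.2 ∧ c + q.2 < cols) ∨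
      (r + q.1, c + q.2) ∈ PySem.Set.add V (r, c)) := by
    simp only [pvFree] at hblocked
    by_cases hm : (r + q.1, c + q.2) ∈ PySem.Set.add V (r, c)
    · exact Or.inr hm
    · exact Or.inl (fun hb => hblocked ⟨hb, hm⟩)
  simp only [snailB_step, ← hq]
  rw [if_pos hc, hdir]

-- walking UP the left column of the rectangle [t..b]×[l..r]
theorem up_walk (rows cols l r t b : Int)
    (hl : 0 ≤ l) (hlr : l ≤ r) (hr : r < cols) (ht : 0 ≤ t) (hb : b < rows) :
    ∀ (k : Nat) (acc : List (Int × Int)) (V : PySem.Set (Int × Int)),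
    t + (k : Int) ≤ b →
    (∀ p, pvFree rows cols V p ↔ (pvInRect l r t b p ∧ (p.2 = l → p.1 ≤ t + (k : Int)))) →
    ∃ V', pvIter rows cols (k + 1) ⟨acc, V, t + (k : Int), l, 0⟩
        = ⟨acc ++ (PySem.List.pyRange (t + (k : Int)) (t - 1) (-1)).map (fun i => (i, l)), V', t, l + 1, 1⟩
      ∧ ∀ p, pvFree rows cols V' p ↔ (pvInRect l r t b p ∧ p.2 ≠ l) := by
  intro k
  induction k with
  | zero =>
    intro acc V hk hchar
    have hd0 : PySem.List.pyGetD pvDirs 0 (0, 0) = (-1, 0) := by decide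
    have hbl : ¬ pvFree rows cols (PySem.Set.add V (t + ((0:Nat):Int), l))
        (t + ((0:Nat):Int) + (PySem.List.pyGetD pvDirs 0 (0, 0)).1,
         l + (PySem.List.pyGetD pvDirs 0 (0, 0)).2) := by
      rw [hd0]
      intro hf
      rw [pvFree_add, hchar] at hf
      rcases hf with ⟨⟨hrect, _⟩, _⟩
      simp only [pvInRect] at hrect
      push_cast at hrect
      omega
    refine ⟨PySem.Set.add V (t + ((0:Nat):Int), l), ?_, ?_⟩
    · simp only [pvIter]
      rw [step_turn rows cols acc V (t + ((0:Nat):Int)) l 0 0 1 (by decide) hbl]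
      have h1 : PySem.Int.mod (0 + 1) 4 = 1 := by decide
      have h2 : PySem.List.pyRange (t + ((0:Nat):Int)) (t - 1) (-1) = [t + ((0:Nat):Int)] := by
        rw [PySem.List.pyRange_neg_one_cons (by push_cast; omega),
            PySem.List.pyRange_neg_one_eq_nil (by push_cast; omega)]
      simp only [h1, h2, List.map_cons, List.map_nil, SnailSt.mk.injEq, true_and, and_true]
      push_cast
      omega
    · intro p
      rw [pvFree_add, hchar p]
      rcases p with ⟨x, y⟩
      simp only [pvInRect, ne_eq, Prod.mk.injEq, not_and]
      push_cast
      omega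
  | succ k ih =>
    intro acc V hk hchar
    have hstep : snailB_step rows cols ⟨acc, V, t + ((k+1:Nat):Int), l, 0⟩ =
        ⟨acc ++ [(t + ((k+1:Nat):Int), l)], PySem.Set.add V (t + ((k+1:Nat):Int), l),
         t + ((k+1:Nat):Int) + -1, l + 0, 0⟩ := by
      apply step_go rows cols acc V _ l 0 (-1) 0 (by decide)
      rw [pvFree_add, hchar]
      refine ⟨⟨?_, ?_⟩, ?_⟩
      · simp only [pvInRect]; push_cast; omega
      · intro _; push_cast; omega
      · simp only [ne_eq, Prod.mk.injEq, not_and]; intro h; omega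
    have hpos : t + ((k+1:Nat):Int) + -1 = t + ((k:Nat):Int) := by push_cast; ring
    have hl0 : l + 0 = l := by ring
    obtain ⟨V', heq, hchar'⟩ := ih (acc ++ [(t + ((k+1:Nat):Int), l)])
        (PySem.Set.add V (t + ((k+1:Nat):Int), l))
        (by push_cast at hk ⊢; omega)
        (by
          intro p
          rw [pvFree_add, hchar p]
          rcases p with ⟨x, y⟩
          simp only [pvInRect, ne_eq, Prod.mk.injEq, not_and]
          push_cast
          omega)
    refine ⟨V', ?_, hchar'⟩
    show pvIter rows cols (k + 1) (snailB_step rows cols ⟨acc, V, t + ((k+1:Nat):Int), l, 0⟩) = _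
    rw [hstep, hpos, hl0, heq]
    have hseg : PySem.List.pyRange (t + ((k+1:Nat):Int)) (t - 1) (-1) =
        (t + ((k+1:Nat):Int)) :: PySem.List.pyRange (t + ((k:Nat):Int)) (t - 1) (-1) := by
      rw [PySem.List.pyRange_neg_one_cons (by push_cast; omega)]
      congr 1
      push_cast
      ring
    rw [hseg]
    simp [List.append_assoc]

-- walking RIGHT along the top row
theorem right_walk (rows cols l r t b : Int)
    (hl : 0 ≤ l) (hr : r < cols) (ht : 0 ≤ t) (htb : t ≤ b) (hb : b < rows) :
    ∀ (k : Nat) (acc : List (Int × Int)) (V : PySem.Set (Int × Int)),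
    l + 1 ≤ r - (k : Int) →
    (∀ p, pvFree rows cols V p ↔ (pvInRect l r t b p ∧ p.2 ≠ l ∧ (p.1 = t → r - (k : Int) ≤ p.2))) →
    ∃ V', pvIter rows cols (k + 1) ⟨acc, V, t, r - (k : Int), 1⟩
        = ⟨acc ++ (PySem.List.pyRange (r - (k : Int)) (r + 1) 1).map (fun c => (t, c)), V', t + 1, r, 2⟩
      ∧ ∀ p, pvFree rows cols V' p ↔ (pvInRect l r t b p ∧ p.2 ≠ l ∧ p.1 ≠ t) := by
  intro k
  induction k with
  | zero =>
    intro acc V hk hchar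
    have hd1 : PySem.List.pyGetD pvDirs 1 (0, 0) = (0, 1) := by decide
    have hbl : ¬ pvFree rows cols (PySem.Set.add V (t, r - ((0:Nat):Int)))
        (t + (PySem.List.pyGetD pvDirs 1 (0, 0)).1,
         r - ((0:Nat):Int) + (PySem.List.pyGetD pvDirs 1 (0, 0)).2) := by
      rw [hd1]
      intro hf
      rw [pvFree_add, hchar] at hf
      rcases hf with ⟨⟨hrect, _⟩, _⟩
      simp only [pvInRect] at hrect
      push_cast at hrect
      omega
    refine ⟨PySem.Set.add V (t, r - ((0:Nat):Int)), ?_, ?_⟩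
    · simp only [pvIter]
      rw [step_turn rows cols acc V t (r - ((0:Nat):Int)) 1 1 0 (by decide) hbl]
      have h1 : PySem.Int.mod (1 + 1) 4 = 2 := by decide
      have h2 : PySem.List.pyRange (r - ((0:Nat):Int)) (r + 1) 1 = [r - ((0:Nat):Int)] := by
        rw [show r + 1 = (r - ((0:Nat):Int)) + 1 by push_cast; ring]
        exact PySem.List.pyRange_one_singleton _
      simp only [h1, h2, List.map_cons, List.map_nil, SnailSt.mk.injEq, true_and, and_true]
      push_cast
      omega
    · intro p
      rw [pvFree_add, hchar p]
      rcases p with ⟨x, y⟩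
      simp only [pvInRect, ne_eq, Prod.mk.injEq, not_and]
      push_cast
      omega
  | succ k ih =>
    intro acc V hk hchar
    have hstep : snailB_step rows cols ⟨acc, V, t, r - ((k+1:Nat):Int), 1⟩ =
        ⟨acc ++ [(t, r - ((k+1:Nat):Int))], PySem.Set.add V (t, r - ((k+1:Nat):Int)),
         t + 0, r - ((k+1:Nat):Int) + 1, 1⟩ := by
      apply step_go rows cols acc V t _ 1 0 1 (by decide)
      rw [pvFree_add, hchar]
      refine ⟨⟨?_, ?_⟩, ?_⟩
      · simp only [pvInRect]; push_cast; omega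
      · constructor
        · push_cast; omega
        · intro _; push_cast; omega
      · simp only [ne_eq, Prod.mk.injEq, not_and]; intro h; push_cast; omega
    have hpos : r - ((k+1:Nat):Int) + 1 = r - ((k:Nat):Int) := by push_cast; ring
    have ht0 : t + 0 = t := by ring
    obtain ⟨V', heq, hchar'⟩ := ih (acc ++ [(t, r - ((k+1:Nat):Int))])
        (PySem.Set.add V (t, r - ((k+1:Nat):Int)))
        (by push_cast at hk ⊢; omega)
        (by
          intro p
          rw [pvFree_add, hchar p]
          rcases p with ⟨x, y⟩
          simp only [pvInRect, ne_eq, Prod.mk.injEq, not_and]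
          push_cast
          omega)
    refine ⟨V', ?_, hchar'⟩
    show pvIter rows cols (k + 1) (snailB_step rows cols ⟨acc, V, t, r - ((k+1:Nat):Int), 1⟩) = _
    rw [hstep, hpos, ht0, heq]
    have hseg : PySem.List.pyRange (r - ((k+1:Nat):Int)) (r + 1) 1 =
        (r - ((k+1:Nat):Int)) :: PySem.List.pyRange (r - ((k:Nat):Int)) (r + 1) 1 := by
      rw [PySem.List.pyRange_one_cons (by push_cast; omega)]
      congr 1
      push_cast
      ring
    rw [hseg]
    simp [List.append_assoc]

-- walking DOWN the right column
theorem down_walk (rows cols l r t b : Int)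
    (hl : 0 ≤ l) (hlr : l + 1 ≤ r) (hr : r < cols) (ht : 0 ≤ t) (hb : b < rows) :
    ∀ (k : Nat) (acc : List (Int × Int)) (V : PySem.Set (Int × Int)),
    t + 1 ≤ b - (k : Int) →
    (∀ p, pvFree rows cols V p ↔ (pvInRect l r t b p ∧ p.2 ≠ l ∧ p.1 ≠ t ∧ (p.2 = r → b - (k : Int) ≤ p.1))) →
    ∃ V', pvIter rows cols (k + 1) ⟨acc, V, b - (k : Int), r, 2⟩
        = ⟨acc ++ (PySem.List.pyRange (b - (k : Int)) (b + 1) 1).map (fun i => (i, r)), V', b, r - 1, 3⟩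
      ∧ ∀ p, pvFree rows cols V' p ↔ (pvInRect l r t b p ∧ p.2 ≠ l ∧ p.1 ≠ t ∧ p.2 ≠ r) := by
  intro k
  induction k with
  | zero =>
    intro acc V hk hchar
    have hd2 : PySem.List.pyGetD pvDirs 2 (0, 0) = (1, 0) := by decide
    have hbl : ¬ pvFree rows cols (PySem.Set.add V (b - ((0:Nat):Int), r))
        (b - ((0:Nat):Int) + (PySem.List.pyGetD pvDirs 2 (0, 0)).1,
         r + (PySem.List.pyGetD pvDirs 2 (0, 0)).2) := by
      rw [hd2]
      intro hf
      rw [pvFree_add, hchar] at hf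
      rcases hf with ⟨⟨hrect, _⟩, _⟩
      simp only [pvInRect] at hrect
      push_cast at hrect
      omega
    refine ⟨PySem.Set.add V (b - ((0:Nat):Int), r), ?_, ?_⟩
    · simp only [pvIter]
      rw [step_turn rows cols acc V (b - ((0:Nat):Int)) r 2 0 (-1) (by decide) hbl]
      have h1 : PySem.Int.mod (2 + 1) 4 = 3 := by decide
      have h2 : PySem.List.pyRange (b - ((0:Nat):Int)) (b + 1) 1 = [b - ((0:Nat):Int)] := by
        rw [show b + 1 = (b - ((0:Nat):Int)) + 1 by push_cast; ring]
        exact PySem.List.pyRange_one_singleton _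
      simp only [h1, h2, List.map_cons, List.map_nil, SnailSt.mk.injEq, true_and, and_true]
      push_cast
      omega
    · intro p
      rw [pvFree_add, hchar p]
      rcases p with ⟨x, y⟩
      simp only [pvInRect, ne_eq, Prod.mk.injEq, not_and]
      push_cast
      omega
  | succ k ih =>
    intro acc V hk hchar
    have hstep : snailB_step rows cols ⟨acc, V, b - ((k+1:Nat):Int), r, 2⟩ =
        ⟨acc ++ [(b - ((k+1:Nat):Int), r)], PySem.Set.add V (b - ((k+1:Nat):Int), r),
         b - ((k+1:Nat):Int) + 1, r + 0, 2⟩ := by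
      apply step_go rows cols acc V _ r 2 1 0 (by decide)
      rw [pvFree_add, hchar]
      refine ⟨⟨?_, ?_⟩, ?_⟩
      · simp only [pvInRect]; push_cast; omega
      · refine ⟨by push_cast; omega, by push_cast; omega, ?_⟩
        intro _; push_cast; omega
      · simp only [ne_eq, Prod.mk.injEq, not_and]; intro h; push_cast; omega
    have hpos : b - ((k+1:Nat):Int) + 1 = b - ((k:Nat):Int) := by push_cast; ring
    have hr0 : r + 0 = r := by ring
    obtain ⟨V', heq, hchar'⟩ := ih (acc ++ [(b - ((k+1:Nat):Int), r)])
        (PySem.Set.add V (b - ((k+1:Nat):Int), r))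
        (by push_cast at hk ⊢; omega)
        (by
          intro p
          rw [pvFree_add, hchar p]
          rcases p with ⟨x, y⟩
          simp only [pvInRect, ne_eq, Prod.mk.injEq, not_and]
          push_cast
          omega)
    refine ⟨V', ?_, hchar'⟩
    show pvIter rows cols (k + 1) (snailB_step rows cols ⟨acc, V, b - ((k+1:Nat):Int), r, 2⟩) = _
    rw [hstep, hpos, hr0, heq]
    have hseg : PySem.List.pyRange (b - ((k+1:Nat):Int)) (b + 1) 1 =
        (b - ((k+1:Nat):Int)) :: PySem.List.pyRange (b - ((k:Nat):Int)) (b + 1) 1 := by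
      rw [PySem.List.pyRange_one_cons (by push_cast; omega)]
      congr 1
      push_cast
      ring
    rw [hseg]
    simp [List.append_assoc]

-- walking LEFT along the bottom row
theorem left_walk (rows cols l r t b : Int)
    (hl : 0 ≤ l) (hr : r < cols) (ht : 0 ≤ t) (htb : t + 1 ≤ b) (hb : b < rows) :
    ∀ (k : Nat) (acc : List (Int × Int)) (V : PySem.Set (Int × Int)),
    l + 1 + (k : Int) ≤ r - 1 →
    (∀ p, pvFree rows cols V p ↔ (pvInRect l r t b p ∧ p.2 ≠ l ∧ p.1 ≠ t ∧ p.2 ≠ r ∧ (p.1 = b → p.2 ≤ l + 1 + (k : Int)))) →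
    ∃ V', pvIter rows cols (k + 1) ⟨acc, V, b, l + 1 + (k : Int), 3⟩
        = ⟨acc ++ (PySem.List.pyRange (l + 1 + (k : Int)) l (-1)).map (fun c => (b, c)), V', b - 1, l + 1, 0⟩
      ∧ ∀ p, pvFree rows cols V' p ↔ (pvInRect l r t b p ∧ p.2 ≠ l ∧ p.1 ≠ t ∧ p.2 ≠ r ∧ p.1 ≠ b) := by
  intro k
  induction k with
  | zero =>
    intro acc V hk hchar
    have hd3 : PySem.List.pyGetD pvDirs 3 (0, 0) = (0, -1) := by decide
    have hbl : ¬ pvFree rows cols (PySem.Set.add V (b, l + 1 + ((0:Nat):Int)))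
        (b + (PySem.List.pyGetD pvDirs 3 (0, 0)).1,
         l + 1 + ((0:Nat):Int) + (PySem.List.pyGetD pvDirs 3 (0, 0)).2) := by
      rw [hd3]
      intro hf
      rw [pvFree_add, hchar] at hf
      rcases hf with ⟨⟨_, hy, _⟩, _⟩
      push_cast at hy
      omega
    refine ⟨PySem.Set.add V (b, l + 1 + ((0:Nat):Int)), ?_, ?_⟩
    · simp only [pvIter]
      rw [step_turn rows cols acc V b (l + 1 + ((0:Nat):Int)) 3 (-1) 0 (by decide) hbl]
      have h1 : PySem.Int.mod (3 + 1) 4 = 0 := by decide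
      have h2 : PySem.List.pyRange (l + 1 + ((0:Nat):Int)) l (-1) = [l + 1 + ((0:Nat):Int)] := by
        rw [PySem.List.pyRange_neg_one_cons (by push_cast; omega),
            PySem.List.pyRange_neg_one_eq_nil (by push_cast; omega)]
      simp only [h1, h2, List.map_cons, List.map_nil, SnailSt.mk.injEq, true_and, and_true]
      push_cast
      omega
    · intro p
      rw [pvFree_add, hchar p]
      rcases p with ⟨x, y⟩
      simp only [pvInRect, ne_eq, Prod.mk.injEq, not_and]
      push_cast
      omega
  | succ k ih =>
    intro acc V hk hchar
    have hstep : snailB_step rows cols ⟨acc, V, b, l + 1 + ((k+1:Nat):Int), 3⟩ =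
        ⟨acc ++ [(b, l + 1 + ((k+1:Nat):Int))], PySem.Set.add V (b, l + 1 + ((k+1:Nat):Int)),
         b + 0, l + 1 + ((k+1:Nat):Int) + -1, 3⟩ := by
      apply step_go rows cols acc V b _ 3 0 (-1) (by decide)
      rw [pvFree_add, hchar]
      refine ⟨⟨?_, ?_⟩, ?_⟩
      · simp only [pvInRect]; push_cast; omega
      · refine ⟨by push_cast; omega, by push_cast; omega, by push_cast; omega, ?_⟩
        intro _; push_cast; omega
      · simp only [ne_eq, Prod.mk.injEq, not_and]; intro h; push_cast; omega
    have hpos : l + 1 + ((k+1:Nat):Int) + -1 = l + 1 + ((k:Nat):Int) := by push_cast; ring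
    have hb0 : b + 0 = b := by ring
    obtain ⟨V', heq, hchar'⟩ := ih (acc ++ [(b, l + 1 + ((k+1:Nat):Int))])
        (PySem.Set.add V (b, l + 1 + ((k+1:Nat):Int)))
        (by push_cast at hk ⊢; omega)
        (by
          intro p
          rw [pvFree_add, hchar p]
          rcases p with ⟨x, y⟩
          simp only [pvInRect, ne_eq, Prod.mk.injEq, not_and]
          push_cast
          omega)
    refine ⟨V', ?_, hchar'⟩
    show pvIter rows cols (k + 1) (snailB_step rows cols ⟨acc, V, b, l + 1 + ((k+1:Nat):Int), 3⟩) = _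
    rw [hstep, hpos, hb0, heq]
    have hseg : PySem.List.pyRange (l + 1 + ((k+1:Nat):Int)) l (-1) =
        (l + 1 + ((k+1:Nat):Int)) :: PySem.List.pyRange (l + 1 + ((k:Nat):Int)) l (-1) := by
      rw [PySem.List.pyRange_neg_one_cons (by push_cast; omega)]
      congr 1
      push_cast
      ring
    rw [hseg]
    simp [List.append_assoc]

-- the main simulation: B's walk over a whole rectangle produces A's layer-by-layer output
theorem layer (rows cols : Int) : ∀ (n : Nat) (fuel : Nat) (l r t b : Int) (acc : List (Int × Int)) (V : PySem.Set (Int × Int)),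
    n = ((b - t + 1) * (r - l + 1)).toNat →
    ((r - l) + (b - t) + 2).toNat ≤ fuel →
    0 ≤ l → l ≤ r → r < cols → 0 ≤ t → t ≤ b → b < rows →
    (∀ p, pvFree rows cols V p ↔ pvInRect l r t b p) →
    (pvIter rows cols n ⟨acc, V, b, l, 0⟩).positions = snailA_loop fuel l r t b acc := by
  intro n
  induction n using Nat.strong_induction_on with
  | _ n IH =>
  intro fuel l r t b acc V hn hfl hl hlr hr ht htb hb hchar
  obtain ⟨fl, rfl⟩ : ∃ fl : Nat, fuel = fl + 1 := ⟨fuel - 1, by omega⟩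
  obtain ⟨dr, hdr⟩ : ∃ dr : Nat, b - t = (dr : Int) := ⟨(b - t).toNat, by omega⟩
  obtain ⟨dc, hdc⟩ : ∃ dc : Nat, r - l = (dc : Int) := ⟨(r - l).toNat, by omega⟩
  have hnval : n = (dr + 1) * (dc + 1) := by
    rw [hn, hdr, hdc,
        show ((dr:Int) + 1) * ((dc:Int) + 1) = (((dr + 1) * (dc + 1) : Nat) : Int) by push_cast; ring]
    exact Int.toNat_natCast _
  -- first leg: up the left column (always runs)
  obtain ⟨V1, heq1, hchar1⟩ := up_walk rows cols l r t b hl hlr hr ht hb dr acc V (by omega)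
    (by intro p; rw [hchar p]; rcases p with ⟨x, y⟩; simp only [pvInRect]; omega)
  rw [show t + ((dr : Nat) : Int) = b from by omega] at heq1
  by_cases hcr : l = r
  · -- single-column rectangle: only the up leg runs
    have hdc0 : dc = 0 := by omega
    have hA : snailA_loop (fl + 1) l r t b acc =
        acc ++ (PySem.List.pyRange b (t - 1) (-1)).map (fun i => (i, l)) := by
      simp only [snailA_loop]
      rw [if_pos (⟨hlr, htb⟩ : l ≤ r ∧ t ≤ b)]
      have h1 : ¬ (l + 1 ≤ r) := by omega
      by_cases h2 : t + 1 ≤ b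
      · simp only [if_neg h1, if_pos h2]
        rw [show l + 1 - 1 = l from by ring, hcr,
            PySem.List.pyRange_neg_one_eq_nil (le_refl r), List.map_nil, List.append_nil,
            PySem.List.pyRange_one_eq_nil (by omega), List.map_nil, List.append_nil]
        exact snailA_stop _ _ _ _ _ _ (by omega)
      · simp only [if_neg h1, if_neg h2]
        rw [PySem.List.pyRange_one_eq_nil (by omega), List.map_nil, List.append_nil]
        exact snailA_stop _ _ _ _ _ _ (by omega)
    rw [hA, show n = dr + 1 from by rw [hnval, hdc0]; ring, heq1]
  · -- l < r: the right leg runs too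
    obtain ⟨e, he⟩ : ∃ e : Nat, dc = e + 1 := ⟨dc - 1, by omega⟩
    obtain ⟨V2, heq2, hchar2⟩ := right_walk rows cols l r t b hl hr ht htb hb e
      (acc ++ (PySem.List.pyRange b (t - 1) (-1)).map (fun i => (i, l))) V1 (by omega)
      (by intro p; rw [hchar1 p]; rcases p with ⟨x, y⟩; simp only [pvInRect, ne_eq]; omega)
    rw [show r - ((e : Nat) : Int) = l + 1 from by omega] at heq2
    by_cases hrb : t = b
    · -- single-row rectangle: up then right, then done
      have hdr0 : dr = 0 := by omega
      have hA : snailA_loop (fl + 1) l r t b acc =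
          acc ++ (PySem.List.pyRange b (t - 1) (-1)).map (fun i => (i, l))
              ++ (PySem.List.pyRange (l + 1) (r + 1) 1).map (fun c => (t, c)) := by
        simp only [snailA_loop]
        rw [if_pos (⟨hlr, htb⟩ : l ≤ r ∧ t ≤ b)]
        have h1 : l + 1 ≤ r := by omega
        have h2 : ¬ (t + 1 ≤ b) := by omega
        simp only [if_pos h1, if_neg h2]
        rw [show b + 1 = t + 1 from by omega, PySem.List.pyRange_one_eq_nil (le_refl (t+1)),
            List.map_nil, List.append_nil]
        exact snailA_stop _ _ _ _ _ _ (by omega)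
      rw [hA, show n = (dr + 1) + (e + 1) from by rw [hnval, hdr0, he]; ring, pvIter_add, heq1, heq2]
    · -- full layer: up, right, down, maybe left, then the inner rectangle
      obtain ⟨a, ha⟩ : ∃ a : Nat, dr = a + 1 := ⟨dr - 1, by omega⟩
      obtain ⟨V3, heq3, hchar3⟩ := down_walk rows cols l r t b hl (by omega) hr ht hb a
        (acc ++ (PySem.List.pyRange b (t - 1) (-1)).map (fun i => (i, l))
             ++ (PySem.List.pyRange (l + 1) (r + 1) 1).map (fun c => (t, c))) V2 (by omega)
        (by intro p; rw [hchar2 p]; rcases p with ⟨x, y⟩; simp only [pvInRect, ne_eq]; omega)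
      rw [show b - ((a : Nat) : Int) = t + 1 from by omega] at heq3
      have h1 : l + 1 ≤ r := by omega
      have h2 : t + 1 ≤ b := by omega
      have hA : snailA_loop (fl + 1) l r t b acc =
          snailA_loop fl (l + 1) (r - 1) (t + 1) (b - 1)
            (acc ++ (PySem.List.pyRange b (t - 1) (-1)).map (fun i => (i, l))
                 ++ (PySem.List.pyRange (l + 1) (r + 1) 1).map (fun c => (t, c))
                 ++ (PySem.List.pyRange (t + 1) (b + 1) 1).map (fun i => (i, r))
                 ++ (PySem.List.pyRange (r - 1) l (-1)).map (fun c => (b, c))) := by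
        simp only [snailA_loop]
        rw [if_pos (⟨hlr, htb⟩ : l ≤ r ∧ t ≤ b)]
        simp only [if_pos h1, if_pos h2]
        rw [show l + 1 - 1 = l from by ring]
      rcases Nat.eq_zero_or_pos e with he0 | hep
      · -- two-column layer: no left leg, inner rectangle empty
        rw [show n = (dr + 1) + ((e + 1) + (a + 1)) from by rw [hnval, ha, he, he0]; ring,
            pvIter_add, pvIter_add, heq1, heq2, heq3, hA]
        rw [show r - 1 = l from by omega, PySem.List.pyRange_neg_one_eq_nil (le_refl l),
            List.map_nil, List.append_nil]
        exact (snailA_stop _ _ _ _ _ _ (by omega)).symm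
      · obtain ⟨f, hf⟩ : ∃ f : Nat, e = f + 1 := ⟨e - 1, by omega⟩
        obtain ⟨V4, heq4, hchar4⟩ := left_walk rows cols l r t b hl hr ht h2 hb f
          (acc ++ (PySem.List.pyRange b (t - 1) (-1)).map (fun i => (i, l))
               ++ (PySem.List.pyRange (l + 1) (r + 1) 1).map (fun c => (t, c))
               ++ (PySem.List.pyRange (t + 1) (b + 1) 1).map (fun i => (i, r))) V3 (by omega)
          (by intro p; rw [hchar3 p]; rcases p with ⟨x, y⟩; simp only [pvInRect, ne_eq]; omega)
        rw [show l + 1 + ((f : Nat) : Int) = r - 1 from by omega] at heq4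
        have hnsum : n = (dr + 1) + ((e + 1) + ((a + 1) + ((f + 1) + a * (f + 1)))) := by
          rw [hnval, ha, he, hf]; ring
        rw [hnsum, pvIter_add, pvIter_add, pvIter_add, pvIter_add, heq1, heq2, heq3, heq4, hA]
        rcases Nat.eq_zero_or_pos a with ha0 | hap
        · -- two-row layer: inner rectangle empty
          subst ha0
          simp only [Nat.zero_mul, pvIter]
          exact (snailA_stop _ _ _ _ _ _ (by omega)).symm
        · -- recurse on the inner rectangle
          have hm : a * (f + 1) < n := by
            obtain ⟨m, hm'⟩ : ∃ m : Nat, m = a * (f + 1) := ⟨_, rfl⟩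
            rw [← hm'] at hnsum ⊢
            omega
          exact IH (a * (f + 1)) hm fl (l + 1) (r - 1) (t + 1) (b - 1) _ V4
            (by
              rw [show (b - 1 - (t + 1) + 1) * (r - 1 - (l + 1) + 1)
                    = ((a : Int)) * ((f : Int) + 1) from by
                      rw [show b - 1 - (t + 1) + 1 = ((a : Int)) from by omega,
                          show r - 1 - (l + 1) + 1 = ((f : Int) + 1) from by omega],
                  show ((a : Int)) * ((f : Int) + 1) = ((a * (f + 1) : Nat) : Int) from by push_cast; ring]
              exact (Int.toNat_natCast _).symm)
            (by omega) (by omega) (by omega) (by omega) (by omega) (by omega) (by omega)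
            (by intro p; rw [hchar4 p]; rcases p with ⟨x, y⟩; simp only [pvInRect, ne_eq]; omega)

-- ===== VERDICT (by name: the statement is the Claim_ definition above) =====
theorem generate_snail_positions_spec : Claim_equal_generate_snail_positions := by
  unfold Claim_equal_generate_snail_positions Spec_generate_snail_positions
  intro rows cols _
  unfold generate_snail_positions generate_snail_positions_alt
  by_cases h : rows ≤ 0 ∨ cols ≤ 0
  · rw [if_pos h]
    exact snailA_stop _ _ _ _ _ _ (by omega)
  · rw [if_neg h]
    push Not at h
    rw [foldl_eq_pvIter, PySem.List.length_pyRange_one]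
    refine (layer rows cols ((rows * cols - 0).toNat) ((cols + rows).toNat) 0 (cols - 1) 0 (rows - 1) [] PySem.Set.empty
      ?_ (by omega) (by omega) (by omega) (by omega) (by omega) (by omega) (by omega) ?_).symm
    · congr 1
      ring
    · intro p
      simp only [pvFree, pvInRect, PySem.Set.empty, List.not_mem_nil, not_false_iff, and_true]
      omega
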